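-- pv_equiv track=rewrite | github.com/HuXiaoyu-TJU/A-comprehensive-landscape-of-human-organ-N-glycoproteome | for_sameID/gPeptide_forsameID.py | replace_comp
-- ===== SOURCE A (Python) =====
-- def replace_comp(comp):
--     replacements = {
--         'H': ')Hex(',
--         'N': 'HexNAc(',
--         'F': ')Fuc(',
--         'S': ')NeuAc('
--     }
--     for old, new in replacements.items():
--         comp = comp.replace(old, new)
--     return comp + ')'
-- ===== SOURCE B (Python) =====
-- def replace_comp(comp):
--     replacements = {
--         'H': ')Hex(',
--         'N': 'HexNAc(',
--         'F': ')Fuc(',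
--         'S': ')NeuAc('
--     }
--     parts = [replacements.get(c, c) for c in comp]
--     parts.append(')')
--     return ''.join(parts)
-- ===== Notes on version B (the rewrite author's own statement) =====
-- stated objective: alternative
-- what changed: B makes one pass over the characters of comp, appending a per-character table lookup to a parts list and joining once, instead of A's four successive whole-string str.replace scans over the rule dict; the simultaneous map equals A's cascade because no inserted target character is reprocessed by a later rule.
import Mathlib
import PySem

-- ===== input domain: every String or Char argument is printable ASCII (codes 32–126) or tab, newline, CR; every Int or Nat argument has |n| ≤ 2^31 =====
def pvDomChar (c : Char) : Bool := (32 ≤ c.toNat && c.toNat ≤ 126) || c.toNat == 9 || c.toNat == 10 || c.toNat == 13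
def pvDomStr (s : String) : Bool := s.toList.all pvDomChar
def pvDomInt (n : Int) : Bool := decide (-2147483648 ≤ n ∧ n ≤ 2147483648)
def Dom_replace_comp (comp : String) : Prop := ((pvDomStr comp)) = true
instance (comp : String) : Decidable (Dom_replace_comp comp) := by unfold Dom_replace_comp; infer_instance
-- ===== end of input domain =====

-- B builds the result in one pass over the characters of comp with a per-character table lookup, instead of A's four successive whole-string replace scans; equal return value, proved on Dom.


-- ===== PORT A =====
-- A's replacement dict in insertion order; the loop over .items() becomes a fold applying str.replace.
def replaceRulesA : List (String × String) :=
  [("H", ")Hex("), ("N", "HexNAc("), ("F", ")Fuc("), ("S", ")NeuAc(")]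

def replace_comp (comp : String) : String :=
  (replaceRulesA.foldl (fun acc p => PySem.Str.replace acc p.1 p.2) comp) ++ ")"

-- ===== PORT B =====
-- B's per-character lookup: replacements.get(c, c)
def replGetB (c : Char) : List Char :=
  if c == 'H' then ")Hex(".toList
  else if c == 'N' then "HexNAc(".toList
  else if c == 'F' then ")Fuc(".toList
  else if c == 'S' then ")NeuAc(".toList
  else [c]

-- Source B: parts = [replacements.get(c, c) for c in comp]; parts.append(')'); ''.join(parts)
def replace_comp_alt (comp : String) : String :=
  String.ofList (comp.toList.flatMap replGetB ++ [')'])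

-- ===== PRECONDITION & SPEC =====
def Spec_replace_comp (comp : String) (out : String) : Prop := out = replace_comp_alt comp
instance (comp : String) (out : String) : Decidable (Spec_replace_comp comp out) := by unfold Spec_replace_comp; infer_instance

-- ===== CLAIM (what is proved, stated in full; the proofs are below) =====
def Claim_equal_replace_comp : Prop := ∀ (comp : String), Dom_replace_comp comp → Spec_replace_comp comp (replace_comp comp)

-- ===== LEMMAS AND PROOFS =====

-- single-character pattern: Python's str.replace is a simultaneous per-character substitution
theorem replace_go_singleton (o : Char) (new : List Char) (l acc : List Char) (fuel : Nat)
    (h : l.length ≤ fuel) :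
    PySem.Chars.replace.go [o] new fuel l acc
      = acc.reverse ++ l.flatMap (fun c => if c == o then new else [c]) := by
  induction l generalizing fuel acc with
  | nil => cases fuel <;> simp [PySem.Chars.replace.go]
  | cons c t ih =>
    cases fuel with
    | zero => simp at h
    | succ n =>
      have ht : t.length ≤ n := Nat.le_of_succ_le_succ (by simpa using h)
      simp only [PySem.Chars.replace.go]
      by_cases hc : o = c
      · have hpre : List.isPrefixOf [o] (c :: t) = true := by
          simp [List.isPrefixOf, hc]
        rw [if_pos hpre]
        simp only [List.length_singleton, List.drop_succ_cons, List.drop_zero]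
        rw [ih _ _ ht]
        simp [hc, beq_iff_eq]
      · have hpre : List.isPrefixOf [o] (c :: t) = false := by
          simp [List.isPrefixOf]
          intro hh; exact hc hh
        rw [if_neg (by simp [hpre])]
        rw [ih _ _ ht]
        simp only [List.flatMap_cons, beq_iff_eq, if_neg (fun hh : c = o => hc hh.symm)]
        simp

theorem replace_singleton (o : Char) (new s : List Char) :
    PySem.Chars.replace s [o] new = s.flatMap (fun c => if c == o then new else [c]) := by
  rw [PySem.Chars.replace]
  simp only [List.isEmpty_cons]
  simpa using replace_go_singleton o new s [] s.length (le_refl _)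

-- the head of A's cascade on one character equals B's one-shot lookup
theorem cascade_head (c : Char) :
    ((((if c == 'H' then ")Hex(".toList else [c]).flatMap
        (fun c => if c == 'N' then "HexNAc(".toList else [c])).flatMap
        (fun c => if c == 'F' then ")Fuc(".toList else [c])).flatMap
        (fun c => if c == 'S' then ")NeuAc(".toList else [c])) = replGetB c := by
  by_cases h1 : c = 'H'
  · subst h1; decide
  by_cases h2 : c = 'N'
  · subst h2; decide
  by_cases h3 : c = 'F'
  · subst h3; decide
  by_cases h4 : c = 'S'
  · subst h4; decide
  simp [replGetB, h1, h2, h3, h4]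

-- A's four substitution passes collapse to one simultaneous pass
theorem cascade (L : List Char) :
    ((((L.flatMap (fun c => if c == 'H' then ")Hex(".toList else [c])).flatMap
        (fun c => if c == 'N' then "HexNAc(".toList else [c])).flatMap
        (fun c => if c == 'F' then ")Fuc(".toList else [c])).flatMap
        (fun c => if c == 'S' then ")NeuAc(".toList else [c])) = L.flatMap replGetB := by
  induction L with
  | nil => rfl
  | cons c t ih =>
    simp only [List.flatMap_cons, List.flatMap_append]
    rw [ih, cascade_head]

-- ===== VERDICT (by name: the statement is the Claim_ definition above) =====
theorem replace_comp_spec : Claim_equal_replace_comp := by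
  intro comp _
  unfold Spec_replace_comp replace_comp replace_comp_alt replaceRulesA
  apply String.toList_inj.mp
  simp only [List.foldl_cons, List.foldl_nil, String.toList_append,
    PySem.Str.toList_replace]
  rw [show ("H".toList) = ['H'] from rfl, show ("N".toList) = ['N'] from rfl,
    show ("F".toList) = ['F'] from rfl, show ("S".toList) = ['S'] from rfl,
    replace_singleton, replace_singleton, replace_singleton, replace_singleton, cascade]
  simp
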